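-- pv_equiv track=rewrite | github.com/LalaSkye/constraint-workshop | commit_gate/src/commit_gate/drift.py | build_authority_graph
-- ===== SOURCE A (Python) =====
-- def build_authority_graph(ruleset):
--     """Build authority graph (adjacency list) from ruleset.
--
--     Graph structure:
--         {actor_id: [action_class, ...], ...}
--
--     Only allowlist entries produce edges (permitted actions).
--     Denylist and escalation do not grant reachable actions.
--     """
--     graph = {}
--     for entry in ruleset.get("allowlist", []):
--         actor = entry.get("actor_id", "*")
--         action = entry.get("action_class", "*")
--         if actor not in graph:
--             graph[actor] = []
--         if action not in graph[actor]:
--             graph[actor].append(action)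
--     # Sort edges for determinism
--     for actor in graph:
--         graph[actor] = sorted(graph[actor])
--     return graph
-- ===== SOURCE B (Python) =====
-- def build_authority_graph(ruleset):
--     """Alternative decomposition: flatten the allowlist into (actor, action)
--     pairs once, dedup the actors in first-seen order, then build each actor's
--     sorted set of actions with a per-actor comprehension."""
--     pairs = [(e.get("actor_id", "*"), e.get("action_class", "*"))
--              for e in ruleset.get("allowlist", [])]
--     actors = list(dict.fromkeys(actor for actor, _ in pairs))
--     return {a: sorted({act for x, act in pairs if x == a}) for a in actors}
-- ===== Notes on version B (the rewrite author's own statement) =====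
-- stated objective: alternative
-- what changed: A builds the dict incrementally with membership tests and a second value-sorting pass; B flattens the allowlist to (actor, action) pairs once, dedups the actors in first-seen order, and builds each actor's sorted action set directly by a per-actor comprehension.
import Mathlib
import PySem

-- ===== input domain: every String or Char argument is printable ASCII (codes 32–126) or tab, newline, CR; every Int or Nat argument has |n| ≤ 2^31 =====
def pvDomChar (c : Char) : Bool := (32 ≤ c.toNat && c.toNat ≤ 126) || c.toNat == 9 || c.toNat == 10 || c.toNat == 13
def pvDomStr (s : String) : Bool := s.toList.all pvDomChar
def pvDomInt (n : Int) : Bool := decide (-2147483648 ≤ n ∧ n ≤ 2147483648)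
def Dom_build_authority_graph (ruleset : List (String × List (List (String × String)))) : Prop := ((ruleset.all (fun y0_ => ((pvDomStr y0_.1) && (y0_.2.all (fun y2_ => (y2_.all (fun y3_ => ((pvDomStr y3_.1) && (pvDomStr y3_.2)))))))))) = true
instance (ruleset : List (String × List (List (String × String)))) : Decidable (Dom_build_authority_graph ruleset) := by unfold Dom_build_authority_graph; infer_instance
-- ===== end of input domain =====

-- B replaces A's incremental dict building with a flatten-to-pairs / dedup-actors / per-actor comprehension decomposition (alternative, not claimed faster).



-- ===== PORT A =====
-- A: incremental dict build (append action if not present), then sort each value list.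
def build_authority_graph (ruleset : List (String × List (List (String × String)))) : List (String × List String) :=
  let allow := (PySem.Dict.mk ruleset).getD "allowlist" []
  let graph := allow.foldl (fun (g : PySem.Dict String (List String)) entry =>
    let actor := (PySem.Dict.mk entry).getD "actor_id" "*"
    let action := (PySem.Dict.mk entry).getD "action_class" "*"
    let g := if g.contains actor then g else g.insert actor []
    if action ∈ g.getD actor [] then g
    else g.insert actor (g.getD actor [] ++ [action])) PySem.Dict.empty
  let graph := graph.keys.foldl (fun (g : PySem.Dict String (List String)) actor =>
    g.insert actor (PySem.List.sorted (g.getD actor []) (fun x => x) false)) graph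
  graph.items

-- ===== PORT B =====
-- B: flatten to pairs, dedup actors first-seen, per-actor sorted action set.
def build_authority_graph_alt (ruleset : List (String × List (List (String × String)))) : List (String × List String) :=
  let pairs := ((PySem.Dict.mk ruleset).getD "allowlist" []).map
    (fun e => ((PySem.Dict.mk e).getD "actor_id" "*", (PySem.Dict.mk e).getD "action_class" "*"))
  let actors := PySem.List.dedup (pairs.map (fun p => p.1))
  actors.map (fun a =>
    (a, PySem.List.sorted (PySem.Set.ofList ((pairs.filter (fun p => p.1 == a)).map (fun p => p.2))) (fun x => x) false))

-- ===== PRECONDITION & SPEC =====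
def Spec_build_authority_graph (ruleset : List (String × List (List (String × String)))) (out : List (String × List String)) : Prop := out = build_authority_graph_alt ruleset
instance (ruleset : List (String × List (List (String × String)))) (out : List (String × List String)) : Decidable (Spec_build_authority_graph ruleset out) := by unfold Spec_build_authority_graph; infer_instance

-- ===== CLAIM (what is proved, stated in full; the proofs are below) =====
def Claim_equal_build_authority_graph : Prop := ∀ (ruleset : List (String × List (List (String × String)))), Dom_build_authority_graph ruleset → Spec_build_authority_graph ruleset (build_authority_graph ruleset)


-- ===== LEMMAS AND PROOFS =====

-- The fold body of A's first loop, phrased on an (actor, action) pair.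
def pvF1 (g : PySem.Dict String (List String)) (p : String × String) : PySem.Dict String (List String) :=
  let g := if g.contains p.1 then g else g.insert p.1 []
  if p.2 ∈ g.getD p.1 [] then g else g.insert p.1 (g.getD p.1 [] ++ [p.2])

-- The deduplicated actions of actor a among the pairs ps, in first-seen order.
def pvActs (ps : List (String × String)) (a : String) : List String :=
  PySem.Set.ofList ((ps.filter (fun p => p.1 == a)).map (fun p => p.2))

theorem pv_items_mk {κ ν : Type} [BEq κ] (l : List (κ × ν)) : (PySem.Dict.mk l).items = l := rfl

theorem pv_get?_mk_map (v : String → List String) (D : List String) (a : String) :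
    (PySem.Dict.mk (D.map (fun b => (b, v b)))).get? a = if a ∈ D then some (v a) else none := by
  induction D with
  | nil => simp [PySem.Dict.get?]
  | cons b D ih =>
    simp only [List.map_cons, PySem.Dict.get?_mk_cons, ih]
    by_cases hba : b = a
    · subst hba; simp
    · simp [hba, Ne.symm hba]

theorem pv_get?_mk_append_cons (P : List (String × List String)) (a : String)
    (w : List String) (R : List (String × List String)) (h : ∀ q ∈ P, q.1 ≠ a) :
    (PySem.Dict.mk (P ++ (a, w) :: R)).get? a = some w := by
  induction P with
  | nil => simp [PySem.Dict.get?_mk_cons]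
  | cons q P ih =>
    have hq : q.1 ≠ a := h q (by simp)
    have : (PySem.Dict.mk ((q.1, q.2) :: (P ++ (a, w) :: R))).get? a
        = if q.1 == a then some q.2 else (PySem.Dict.mk (P ++ (a, w) :: R)).get? a :=
      PySem.Dict.get?_mk_cons _ _ _ _
    simpa [hq, ih (fun r hr => h r (by simp [hr]))] using this

-- Characterisation of A's first loop: keys in first-seen actor order,
-- values the deduplicated actions in first-seen order.
theorem pv_dedup_snoc (xs : List String) (x : String) :
    PySem.List.dedup (xs ++ [x])
      = if x ∈ xs then PySem.List.dedup xs else PySem.List.dedup xs ++ [x] := by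
  simp only [PySem.List.dedup_eq_ofList, PySem.Set.ofList_append_singleton,
    PySem.Set.add_eq_ite, PySem.Set.mem_ofList]

theorem pv_pvActs_snoc (ps : List (String × String)) (p : String × String) (a : String) :
    pvActs (ps ++ [p]) a
      = if p.1 = a then PySem.Set.add (pvActs ps a) p.2 else pvActs ps a := by
  unfold pvActs
  rw [List.filter_append]
  by_cases h : p.1 = a
  · simp [h, PySem.Set.ofList_append_singleton]
  · simp [h]

theorem pv_pvActs_of_not_mem (ps : List (String × String)) (a : String)
    (h : a ∉ ps.map (fun p => p.1)) : pvActs ps a = [] := by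
  unfold pvActs
  have hf : ps.filter (fun p => p.1 == a) = [] := by
    apply List.filter_eq_nil_iff.mpr
    intro p hp
    simp only [beq_iff_eq]
    exact fun he => h (he ▸ List.mem_map_of_mem hp)
  simp [hf, PySem.Set.ofList]

theorem pv_phase1 (ps : List (String × String)) :
    (ps.foldl pvF1 PySem.Dict.empty).items
      = (PySem.List.dedup (ps.map (fun p => p.1))).map (fun a => (a, pvActs ps a)) := by
  induction ps using List.reverseRecOn with
  | nil => rfl
  | append_singleton done p ih =>
    rw [List.foldl_append, List.foldl_cons, List.foldl_nil]
    have hg : done.foldl pvF1 PySem.Dict.empty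
        = PySem.Dict.mk ((PySem.List.dedup (done.map (fun p => p.1))).map
            (fun a => (a, pvActs done a))) := PySem.Dict.ext ih
    rw [hg]
    have hget := pv_get?_mk_map (pvActs done) (PySem.List.dedup (done.map (fun p => p.1))) p.1
    by_cases hmem : p.1 ∈ done.map (fun p => p.1)
    · have hmemD : p.1 ∈ PySem.List.dedup (done.map (fun p => p.1)) :=
        (PySem.List.mem_dedup _ _).mpr hmem
      have hcont : (PySem.Dict.mk ((PySem.List.dedup (done.map (fun p => p.1))).map
          (fun a => (a, pvActs done a)))).contains p.1 = true := by
        rw [PySem.Dict.contains_eq_isSome_get?, hget, if_pos hmemD]; rfl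
      have hgetD : (PySem.Dict.mk ((PySem.List.dedup (done.map (fun p => p.1))).map
          (fun a => (a, pvActs done a)))).getD p.1 [] = pvActs done p.1 := by
        rw [PySem.Dict.getD_eq_get?_getD, hget, if_pos hmemD]; rfl
      have hD : PySem.List.dedup ((done ++ [p]).map (fun p => p.1))
          = PySem.List.dedup (done.map (fun p => p.1)) := by
        rw [List.map_append, List.map_cons, List.map_nil, pv_dedup_snoc, if_pos hmem]
      rw [hD]
      unfold pvF1
      rw [hcont]
      simp only [if_true, hgetD]
      by_cases hin : p.2 ∈ pvActs done p.1
      · rw [if_pos hin, pv_items_mk]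
        apply List.map_congr_left
        intro b hb
        rw [pv_pvActs_snoc]
        by_cases hbp : p.1 = b
        · subst hbp
          rw [if_pos rfl, PySem.Set.add_of_mem hin]
        · rw [if_neg hbp]
      · rw [if_neg hin, PySem.Dict.items_insert, hcont]
        simp only [if_true, List.map_map]
        apply List.map_congr_left
        intro b hb
        rw [pv_pvActs_snoc]
        by_cases hbp : p.1 = b
        · subst hbp
          simp [PySem.Set.add_of_not_mem hin]
        · have : b ≠ p.1 := fun h => hbp h.symm
          simp [Function.comp, this, hbp]
    · have hmemD : p.1 ∉ PySem.List.dedup (done.map (fun p => p.1)) :=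
        fun h => hmem ((PySem.List.mem_dedup _ _).mp h)
      have hcont : (PySem.Dict.mk ((PySem.List.dedup (done.map (fun p => p.1))).map
          (fun a => (a, pvActs done a)))).contains p.1 = false := by
        rw [PySem.Dict.contains_eq_isSome_get?, hget, if_neg hmemD]; rfl
      have hD : PySem.List.dedup ((done ++ [p]).map (fun p => p.1))
          = PySem.List.dedup (done.map (fun p => p.1)) ++ [p.1] := by
        rw [List.map_append, List.map_cons, List.map_nil, pv_dedup_snoc, if_neg hmem]
      rw [hD]
      unfold pvF1
      rw [hcont]
      simp only [Bool.false_eq_true, if_false]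
      have hgetD2 : ((PySem.Dict.mk ((PySem.List.dedup (done.map (fun p => p.1))).map
          (fun a => (a, pvActs done a)))).insert p.1 []).getD p.1 [] = ([] : List String) := by
        rw [PySem.Dict.getD_eq_get?_getD, PySem.Dict.get?_insert_self]; rfl
      rw [hgetD2]
      simp only [List.not_mem_nil, if_false, List.nil_append]
      rw [PySem.Dict.items_insert, PySem.Dict.contains_insert_self]
      simp only [if_true]
      rw [PySem.Dict.items_insert, hcont]
      simp only [Bool.false_eq_true, if_false, List.map_append, List.map_map,
        List.map_cons, List.map_nil]
      congr 1
      · apply List.map_congr_left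
        intro b hb
        have hbp : b ≠ p.1 := fun h => hmemD (h ▸ hb)
        rw [pv_pvActs_snoc, if_neg (fun h => hbp h.symm)]
        simp [Function.comp, hbp]
      · simp only [beq_self_eq_true, if_pos]
        rw [pv_pvActs_snoc, if_pos rfl, pv_pvActs_of_not_mem done p.1 hmem]
        rfl

-- A's second loop sorts each value in place.
theorem pv_phase2 (A : List String) (P : List (String × List String)) (v : String → List String)
    (hA : A.Nodup) (hP : ∀ q ∈ P, q.1 ∉ A) :
    (A.foldl (fun g a => g.insert a (PySem.List.sorted (g.getD a []) (fun x => x) false))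
      (PySem.Dict.mk (P ++ A.map (fun a => (a, v a))))).items
    = P ++ A.map (fun a => (a, PySem.List.sorted (v a) (fun x => x) false)) := by
  induction A generalizing P with
  | nil => simp [pv_items_mk]
  | cons a A ih =>
    have haA : a ∉ A := (List.nodup_cons.mp hA).1
    have hget : (PySem.Dict.mk (P ++ (a, v a) :: A.map (fun b => (b, v b)))).get? a = some (v a) :=
      pv_get?_mk_append_cons P a (v a) _ (fun q hq h => hP q hq (by simp [h]))
    have hcont : (PySem.Dict.mk (P ++ (a, v a) :: A.map (fun b => (b, v b)))).contains a = true := by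
      rw [PySem.Dict.contains_eq_isSome_get?, hget]; rfl
    have hgetD : (PySem.Dict.mk (P ++ (a, v a) :: A.map (fun b => (b, v b)))).getD a [] = v a := by
      rw [PySem.Dict.getD_eq_get?_getD, hget]; rfl
    have hins : (PySem.Dict.mk (P ++ (a, v a) :: A.map (fun b => (b, v b)))).insert a
        (PySem.List.sorted (v a) (fun x => x) false)
        = PySem.Dict.mk ((P ++ [(a, PySem.List.sorted (v a) (fun x => x) false)])
            ++ A.map (fun b => (b, v b))) := by
      apply PySem.Dict.ext
      rw [PySem.Dict.items_insert, hcont]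
      simp only [if_true]
      simp only [List.map_append, List.map_cons, List.append_assoc,
        List.cons_append, List.nil_append]
      congr 1
      · nth_rewrite 2 [show P = P.map id from (List.map_id P).symm]
        apply List.map_congr_left
        intro q hq
        have : q.1 ≠ a := fun h => hP q hq (by simp [h])
        simp [this]
      · simp only [beq_self_eq_true, if_pos]
        congr 1
        rw [List.map_map]
        apply List.map_congr_left
        intro b hb
        have : b ≠ a := fun h => haA (h ▸ hb)
        simp [Function.comp, this]
    simp only [List.map_cons, List.foldl_cons, hgetD, hins]
    rw [ih (P ++ [(a, PySem.List.sorted (v a) (fun x => x) false)]) (List.nodup_cons.mp hA).2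
      (by intro q hq
          rcases List.mem_append.mp hq with h | h
          · exact fun hm => hP q h (by simp [hm])
          · simp at h; subst h; simpa using haA)]
    simp

-- ===== VERDICT (by name: the statement is the Claim_ definition above) =====
theorem build_authority_graph_spec : Claim_equal_build_authority_graph := by
  intro ruleset _
  unfold Spec_build_authority_graph build_authority_graph build_authority_graph_alt
  simp only []
  set allow := (PySem.Dict.mk ruleset).getD "allowlist" [] with hallow
  set pairs := allow.map
    (fun e => ((PySem.Dict.mk e).getD "actor_id" "*", (PySem.Dict.mk e).getD "action_class" "*"))
    with hpairs
  have hfold1 : allow.foldl (fun (g : PySem.Dict String (List String)) entry =>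
      let actor := (PySem.Dict.mk entry).getD "actor_id" "*"
      let action := (PySem.Dict.mk entry).getD "action_class" "*"
      let g := if g.contains actor then g else g.insert actor []
      if action ∈ g.getD actor [] then g
      else g.insert actor (g.getD actor [] ++ [action])) PySem.Dict.empty
      = pairs.foldl pvF1 PySem.Dict.empty := by
    rw [hpairs, List.foldl_map]
    rfl
  rw [hfold1]
  have hitems := pv_phase1 pairs
  have hgraph : pairs.foldl pvF1 PySem.Dict.empty
      = PySem.Dict.mk ([] ++ (PySem.List.dedup (pairs.map (fun p => p.1))).map
          (fun a => (a, pvActs pairs a))) := by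
    apply PySem.Dict.ext
    simpa using hitems
  rw [hgraph]
  have hkeys : (PySem.Dict.mk ([] ++ (PySem.List.dedup (pairs.map (fun p => p.1))).map
      (fun a => (a, pvActs pairs a)))).keys = PySem.List.dedup (pairs.map (fun p => p.1)) := by
    simp [PySem.Dict.keys, Function.comp_def]
  rw [hkeys]
  rw [pv_phase2 (PySem.List.dedup (pairs.map (fun p => p.1))) [] (pvActs pairs)
    (PySem.List.nodup_dedup _) (by intro q hq; cases hq)]
  simp [pvActs]
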